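-- pv_equiv track=rewrite | github.com/Fondamenti18/fondamenti-di-programmazione | students/1757075/homework02/program01.py | occorrenze
-- ===== SOURCE A (Python) =====
-- def occorrenze(post, numeri, insieme):
--     ''' metodo che calcola le occorrenze delle parole della lista nell'insieme '''
--     mod = list(insieme)             # lista per modificare valori insieme per verifica
--     insieme = []                    # nuova lista in cui aggiungere valori
--     for i in mod:
--         insieme.append(i.lower())   # metto la stringa con caratteri minuscoli per
--                                     # non fare errori durante confronto
--     insieme = set(insieme)          # faccio tornare set
--     c = 0                           # contatore
--     # finche' non scorro tutta la lista finche la parola non e' nell'insieme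
--     while c < len(post) and post[c] not in insieme:
--         c += 1
--     # se non sono arrivato a fine lista ho trovato occorrenza
--     if len(post) - c > 0:
--         return numeri[0]
-- ===== SOURCE B (Python) =====
-- def occorrenze(post, numeri, insieme):
--     ''' metodo che calcola le occorrenze delle parole della lista nell'insieme '''
--     low = {x.lower() for x in insieme}
--     if low & set(post):
--         return numeri[0]
-- ===== Notes on version B (the rewrite author's own statement) =====
-- stated objective: simpler
-- what changed: Replaces the index-walking while loop with its counter and the 'len(post)-c > 0' test by a single set-intersection test between the lowercased set and set(post).
import Mathlib
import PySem

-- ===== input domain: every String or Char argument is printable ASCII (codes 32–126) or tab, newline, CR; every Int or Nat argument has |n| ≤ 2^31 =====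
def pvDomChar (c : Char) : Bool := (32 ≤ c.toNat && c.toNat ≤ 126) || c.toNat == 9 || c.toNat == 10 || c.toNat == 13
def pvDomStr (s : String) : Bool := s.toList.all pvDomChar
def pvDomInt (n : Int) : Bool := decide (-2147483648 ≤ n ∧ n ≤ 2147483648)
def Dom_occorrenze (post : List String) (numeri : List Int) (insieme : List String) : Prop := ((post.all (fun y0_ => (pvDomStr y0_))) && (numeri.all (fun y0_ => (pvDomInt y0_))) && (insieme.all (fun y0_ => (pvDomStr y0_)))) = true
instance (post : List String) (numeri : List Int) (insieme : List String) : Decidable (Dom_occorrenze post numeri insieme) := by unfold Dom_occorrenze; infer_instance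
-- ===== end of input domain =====

-- B replaces A's counter-driven while-loop scan by a single set-intersection test (objective: simpler).

-- ===== PORT A =====
-- the while loop: number of leading elements of the remaining list not in the set
def occWhile (s : PySem.Set String) : List String → Nat
  | [] => 0
  | x :: xs => if PySem.Set.contains s x then 0 else occWhile s xs + 1

def occorrenze (post : List String) (numeri : List Int) (insieme : List String) : Option Int :=
  let mod := insieme
  let ins := mod.foldl (fun acc i => acc ++ [PySem.Str.lower i]) []
  let s := PySem.Set.ofList ins
  let c := occWhile s post
  if post.length - c > 0 then PySem.List.pyGet? numeri 0 else none

-- ===== PORT B =====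
def occorrenze_alt (post : List String) (numeri : List Int) (insieme : List String) : Option Int :=
  let low := PySem.Set.ofList (insieme.map PySem.Str.lower)
  if (PySem.Set.inter low (PySem.Set.ofList post)).isEmpty then none
  else PySem.List.pyGet? numeri 0

-- ===== PRECONDITION & SPEC =====
-- Pre_ excludes exactly the inputs where A raises IndexError: a match exists but numeri is empty.
def Pre_occorrenze (post : List String) (numeri : List Int) (insieme : List String) : Prop :=
  (post.any (fun x => (insieme.map PySem.Str.lower).contains x) = true) → numeri ≠ []
instance (post : List String) (numeri : List Int) (insieme : List String) : Decidable (Pre_occorrenze post numeri insieme) := by unfold Pre_occorrenze; infer_instance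
def pvWitness_occorrenze : List String × List Int × List String := (["a", "b"], [7, 3], ["A", "c"])

def Spec_occorrenze (post : List String) (numeri : List Int) (insieme : List String) (out : Option Int) : Prop := out = occorrenze_alt post numeri insieme
instance (post : List String) (numeri : List Int) (insieme : List String) (out : Option Int) : Decidable (Spec_occorrenze post numeri insieme out) := by unfold Spec_occorrenze; infer_instance

-- ===== CLAIM (what is proved, stated in full; the proofs are below) =====
def Claim_equal_occorrenze : Prop := ∀ (post : List String) (numeri : List Int) (insieme : List String), Dom_occorrenze post numeri insieme → Pre_occorrenze post numeri insieme → Spec_occorrenze post numeri insieme (occorrenze post numeri insieme)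

-- ===== LEMMAS AND PROOFS =====

lemma occWhile_le (s : PySem.Set String) (xs : List String) : occWhile s xs ≤ xs.length := by
  induction xs with
  | nil => simp [occWhile]
  | cons x xs ih =>
    simp only [occWhile, List.length_cons]
    split <;> omega

lemma occWhile_found_iff (s : PySem.Set String) (xs : List String) :
    xs.length - occWhile s xs > 0 ↔ ∃ x ∈ xs, PySem.Set.contains s x = true := by
  induction xs with
  | nil => simp [occWhile]
  | cons x xs ih =>
    by_cases h : PySem.Set.contains s x = true
    · have h0 : occWhile s (x :: xs) = 0 := by
        have hm : x ∈ s := by simpa using h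
        simp [occWhile, hm]
      rw [h0, List.length_cons]
      constructor
      · intro _; exact ⟨x, List.mem_cons_self, h⟩
      · intro _; omega
    · have h0 : occWhile s (x :: xs) = occWhile s xs + 1 := by
        have hm : x ∉ s := by intro hm; exact h (by simpa using hm)
        simp [occWhile, hm]
      rw [h0, List.length_cons]
      have hle := occWhile_le s xs
      constructor
      · intro hpos
        rcases ih.mp (by omega) with ⟨y, hy, hc⟩
        exact ⟨y, List.mem_cons_of_mem _ hy, hc⟩
      · rintro ⟨y, hy, hc⟩
        rcases List.mem_cons.mp hy with rfl | hy'
        · exact absurd hc h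
        · have := ih.mpr ⟨y, hy', hc⟩; omega

lemma foldl_append_lower (insieme : List String) :
    insieme.foldl (fun acc i => acc ++ [PySem.Str.lower i]) [] = insieme.map PySem.Str.lower := by
  have h : ∀ (l : List String) (acc : List String),
      l.foldl (fun acc i => acc ++ [PySem.Str.lower i]) acc = acc ++ l.map PySem.Str.lower := by
    intro l
    induction l with
    | nil => simp
    | cons x xs ih => intro acc; simp [List.foldl, ih]
  simpa using h insieme []

lemma inter_isEmpty_iff (low : PySem.Set String) (post : List String) :
    (PySem.Set.inter low (PySem.Set.ofList post)).isEmpty = true ↔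
      ¬ ∃ x ∈ post, x ∈ low := by
  rw [List.isEmpty_iff, List.eq_nil_iff_forall_not_mem]
  constructor
  · intro h ⟨x, hx, hxl⟩
    exact h x (by simp [PySem.Set.mem_inter, hxl, PySem.Set.mem_ofList, hx])
  · intro h x hx
    rw [PySem.Set.mem_inter, PySem.Set.mem_ofList] at hx
    exact h ⟨x, hx.2, hx.1⟩

-- ===== VERDICT (by name: the statement is the Claim_ definition above) =====
theorem occorrenze_spec : Claim_equal_occorrenze := by
  intro post numeri insieme _hdom _hpre
  unfold Spec_occorrenze occorrenze occorrenze_alt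
  simp only [foldl_append_lower]
  set low := PySem.Set.ofList (insieme.map PySem.Str.lower) with hlow
  by_cases hfound : ∃ x ∈ post, PySem.Set.contains low x = true
  · have h1 : post.length - occWhile low post > 0 := (occWhile_found_iff low post).mpr hfound
    have h2 : (PySem.Set.inter low (PySem.Set.ofList post)).isEmpty = false := by
      rw [Bool.eq_false_iff]
      intro hc
      exact (inter_isEmpty_iff low post).mp hc
        (by rcases hfound with ⟨x, hx, hc'⟩; exact ⟨x, hx, by simpa [PySem.Set.contains] using hc'⟩)
    simp [h1, h2]
  · have h1 : ¬ post.length - occWhile low post > 0 := fun hp =>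
      hfound ((occWhile_found_iff low post).mp hp)
    have h2 : (PySem.Set.inter low (PySem.Set.ofList post)).isEmpty = true := by
      rw [inter_isEmpty_iff]
      rintro ⟨x, hx, hxl⟩
      exact hfound ⟨x, hx, by simpa [PySem.Set.contains] using hxl⟩
    simp [h1, h2]
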